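-- pv_equiv track=rewrite | github.com/anishganti/runescape-mini-vla | src/scripts/track_gameplay.py | validate_frames
-- ===== SOURCE A (Python) =====
-- def validate_frames(statuses):
--     failed_frame_id = None
--     failed_frame_cnt = 0
--     failed_in_a_row = 3
--
--     for i in range(len(statuses)):
--         if not statuses[i]:
--             failed_frame_cnt+=1
--             failed_in_a_row+=1
--
--             if failed_frame_id is None:
--                 failed_frame_id = i
--         else:
--             failed_in_a_row = 0
--
--         if failed_frame_cnt == 5 or failed_in_a_row == 3:
--             break
--
--     return failed_frame_id
-- ===== SOURCE B (Python) =====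
-- def validate_frames(statuses):
--     # Divide and conquer: first falsy index in statuses[lo:hi], else None.
--     # A's counters and break conditions never change the result (the id is
--     # frozen at the first failure), so only that first index matters.
--     def solve(seg, base):
--         if not seg:
--             return None
--         if len(seg) == 1:
--             return None if seg[0] else base
--         mid = len(seg) // 2
--         left = solve(seg[:mid], base)
--         return left if left is not None else solve(seg[mid:], base + mid)
--     return solve(statuses, 0)
-- ===== Notes on version B (the rewrite author's own statement) =====
-- stated objective: alternative
-- what changed: A's counters and break conditions never affect the returned id (it is frozen at the first falsy index), so B drops all loop state and computes the first falsy index by a divide-and-conquer recursion that splits the list in halves and takes the left half's answer when present.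
import Mathlib
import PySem

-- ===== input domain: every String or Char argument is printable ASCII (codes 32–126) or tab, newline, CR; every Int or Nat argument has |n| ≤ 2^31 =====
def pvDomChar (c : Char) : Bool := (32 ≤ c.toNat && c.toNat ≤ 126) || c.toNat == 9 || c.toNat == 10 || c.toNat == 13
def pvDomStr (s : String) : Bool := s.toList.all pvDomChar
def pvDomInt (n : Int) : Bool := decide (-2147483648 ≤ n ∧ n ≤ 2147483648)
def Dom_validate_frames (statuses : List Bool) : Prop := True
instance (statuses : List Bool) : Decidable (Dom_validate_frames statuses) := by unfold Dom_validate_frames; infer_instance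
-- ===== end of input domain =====

-- B replaces A's single scan with dead counters/breaks by a divide-and-conquer
-- recursion for the first falsy index (A's counters never change the result).

-- ===== PORT A =====
-- loop of A: state (failed_frame_id, failed_frame_cnt, failed_in_a_row), i the current index,
-- break modelled by returning fid instead of recursing
def validateFramesGo (l : List Bool) (i : Int) (fid : Option Int) (cnt row : Int) : Option Int :=
  match l with
  | [] => fid
  | s :: rest =>
    if !s then
      let cnt' := cnt + 1
      let row' := row + 1
      let fid' := if fid = none then some i else fid
      if cnt' = 5 ∨ row' = 3 then fid' else validateFramesGo rest (i + 1) fid' cnt' row'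
    else
      if cnt = 5 ∨ (0 : Int) = 3 then fid else validateFramesGo rest (i + 1) fid cnt 0

def validate_frames (statuses : List Bool) : Option Int :=
  validateFramesGo statuses 0 none 0 3

-- ===== PORT B =====
-- solve(seg, base) from Source B; seg[:mid] / seg[mid:] with 0 ≤ mid ≤ len(seg) are
-- exactly List.take mid / List.drop mid
def vfSolve (seg : List Bool) (base : Int) : Option Int :=
  match seg with
  | [] => none
  | [b] => if b then none else some base
  | a :: b :: rest =>
    let mid := (a :: b :: rest).length / 2
    match vfSolve ((a :: b :: rest).take mid) base with
    | some j => some j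
    | none => vfSolve ((a :: b :: rest).drop mid) (base + (mid : Int))
termination_by seg.length
decreasing_by
  · simp; omega
  · simp; omega

def validate_frames_alt (statuses : List Bool) : Option Int :=
  vfSolve statuses 0

-- ===== PRECONDITION & SPEC =====
def Spec_validate_frames (statuses : List Bool) (out : Option Int) : Prop := out = validate_frames_alt statuses
instance (statuses : List Bool) (out : Option Int) : Decidable (Spec_validate_frames statuses out) := by unfold Spec_validate_frames; infer_instance

-- ===== CLAIM (what is proved, stated in full; the proofs are below) =====
def Claim_equal_validate_frames : Prop := ∀ (statuses : List Bool), Dom_validate_frames statuses → Spec_validate_frames statuses (validate_frames statuses)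

-- ===== LEMMAS AND PROOFS =====

-- common characterisation: first index of `false`, shifted by the base offset
def firstFalse (l : List Bool) (base : Int) : Option Int :=
  match PySem.List.index? l false with
  | some n => some ((n : Int) + base)
  | none => none

-- once failed_frame_id is set it is never changed and is what every exit returns
theorem validateFramesGo_some (l : List Bool) : ∀ (i j cnt row : Int),
    validateFramesGo l i (some j) cnt row = some j := by
  induction l with
  | nil => intro i j cnt row; rfl
  | cons s rest ih =>
    intro i j cnt row
    cases s <;> simp only [validateFramesGo, Bool.not_false, Bool.not_true, if_true, if_false, Bool.false_eq_true] <;> split <;> simp [ih]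

-- with no failure seen yet (fid = none, cnt = 0) A's loop returns the first falsy index, offset by i
theorem validateFramesGo_none (l : List Bool) : ∀ (i row : Int),
    validateFramesGo l i none 0 row = firstFalse l i := by
  induction l with
  | nil => intro i row; rfl
  | cons s rest ih =>
    intro i row
    cases s with
    | false =>
      unfold firstFalse
      rw [PySem.List.index?_cons_self]
      simp only [validateFramesGo, Bool.not_false]
      split <;> simp_all [validateFramesGo_some]
    | true =>
      unfold firstFalse
      rw [PySem.List.index?_cons_of_ne rest (by simp)]
      simp only [validateFramesGo, Bool.not_true]
      rw [if_neg (by simp), if_neg (by norm_num), ih (i + 1) 0]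
      unfold firstFalse
      cases h : PySem.List.index? rest false with
      | none => simp
      | some n => simp; ring

-- first falsy index splits over an append: left half wins when it has one
theorem firstFalse_append (l₁ l₂ : List Bool) (base : Int) :
    firstFalse (l₁ ++ l₂) base =
      match firstFalse l₁ base with
      | some j => some j
      | none => firstFalse l₂ (base + (l₁.length : Int)) := by
  unfold firstFalse
  simp only [PySem.List.index?_eq_idxOf?, List.idxOf?, List.findIdx?_append]
  cases h1 : List.findIdx? (· == false) l₁ with
  | some m => simp
  | none =>
    cases h2 : List.findIdx? (· == false) l₂ with
    | none => simp
    | some k => simp; ring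

-- B's divide-and-conquer computes the same first falsy index
theorem vfSolve_eq (seg : List Bool) (base : Int) : vfSolve seg base = firstFalse seg base := by
  induction seg, base using vfSolve.induct with
  | case1 base => simp [vfSolve, firstFalse]
  | case2 base =>
    simp [vfSolve, firstFalse, PySem.List.index?_eq_idxOf?, List.idxOf?]
  | case3 base b hb =>
    rw [Bool.not_eq_true] at hb; subst hb
    simp [vfSolve, firstFalse, PySem.List.index?_eq_idxOf?, List.idxOf?]
  | case4 base a b rest mid j hsome ih =>
    have hsplit := firstFalse_append ((a :: b :: rest).take ((a :: b :: rest).length / 2))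
      ((a :: b :: rest).drop ((a :: b :: rest).length / 2)) base
    rw [List.take_append_drop] at hsplit
    rw [vfSolve, hsome, hsplit, ← ih, hsome]
  | case5 base a b rest mid hnone ih₁ ih₂ =>
    have hsplit := firstFalse_append ((a :: b :: rest).take ((a :: b :: rest).length / 2))
      ((a :: b :: rest).drop ((a :: b :: rest).length / 2)) base
    rw [List.take_append_drop] at hsplit
    have hlen : ((a :: b :: rest).take ((a :: b :: rest).length / 2)).length
        = (a :: b :: rest).length / 2 := by simp; omega
    rw [vfSolve, hnone, hsplit, ← ih₁, hnone, ih₂, hlen]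

-- ===== VERDICT (by name: the statement is the Claim_ definition above) =====
theorem validate_frames_spec : Claim_equal_validate_frames := by
  intro statuses _
  show validate_frames statuses = validate_frames_alt statuses
  unfold validate_frames validate_frames_alt
  rw [validateFramesGo_none statuses 0 3, vfSolve_eq]
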